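-- pv_equiv track=rewrite | github.com/teenorth/csv-reviewer | api/util/__init__.py | missing_keys_message
-- ===== SOURCE A (Python) =====
-- def missing_keys_message(data, keys):
--     '''Creates a message containing all the keys that where
--     missing from a dictionary
--
--     Parameters:
--       data (dictionary): Dataset to validate
--       keys (array): Keys to validate against
--
--     Returns:
--       String
--     '''
--     missing = [key for key in keys if key not in data]
--
--     if len(missing) == 1:
--         return f'{missing[0]} is missing from the request'
--     if len(missing) == 2:
--         return f'{missing[0]} and {missing[1]} is missing from the request'
--
--     message = ''
--     for idx, key in enumerate(missing):
--         if idx + 2 == len(missing):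
--             message += f'{key} and {missing[idx + 1]} is missing from the request'
--             break
--         else:
--             message += f'{key}, '
--
--     return message
-- ===== SOURCE B (Python) =====
-- def missing_keys_message(data, keys):
--     missing = [key for key in keys if key not in data]
--     if not missing:
--         return ''
--     if len(missing) == 1:
--         return f'{missing[0]} is missing from the request'
--     return ', '.join(map(str, missing[:-1])) + f' and {missing[-1]} is missing from the request'
-- ===== Notes on version B (the rewrite author's own statement) =====
-- stated objective: simpler
-- what changed: Replaces the enumerate/index-arithmetic accumulator loop with break (plus two special-cased lengths) by a slice-and-join closed form: join all but the last missing key with ', ' and append ' and <last> is missing from the request'.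
import Mathlib
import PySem

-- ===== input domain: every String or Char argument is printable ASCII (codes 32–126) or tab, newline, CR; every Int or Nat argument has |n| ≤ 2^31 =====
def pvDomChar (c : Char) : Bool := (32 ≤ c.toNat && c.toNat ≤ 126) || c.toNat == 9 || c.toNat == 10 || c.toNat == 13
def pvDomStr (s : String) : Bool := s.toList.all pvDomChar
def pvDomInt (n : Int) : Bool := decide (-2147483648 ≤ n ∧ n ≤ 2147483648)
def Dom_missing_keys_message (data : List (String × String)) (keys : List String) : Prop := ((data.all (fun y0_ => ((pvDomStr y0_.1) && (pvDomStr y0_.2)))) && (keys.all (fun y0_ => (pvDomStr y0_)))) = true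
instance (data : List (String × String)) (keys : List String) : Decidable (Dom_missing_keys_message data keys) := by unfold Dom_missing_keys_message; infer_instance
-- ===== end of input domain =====

-- B replaces A's enumerate/index-arithmetic accumulator loop (with break and two special-cased
-- lengths) by a slice-and-join closed form over the same `missing` list; objective: simpler.
-- ===== PORT A =====
-- loop of A: iterates over the remaining missing keys, carrying idx, the full list and the message;
-- breaks when idx + 2 == len(missing)
def pvALoop (m : List String) : List String → Nat → String → String
  | [], _, msg => msg
  | k :: rest, idx, msg =>
    if idx + 2 = m.length then
      msg ++ k ++ " and " ++ ((PySem.List.pyGet? m ((idx : Int) + 1)).getD "") ++ " is missing from the request"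
    else
      pvALoop m rest (idx + 1) (msg ++ k ++ ", ")

def missing_keys_message (data : List (String × String)) (keys : List String) : String :=
  let missing := keys.filter (fun key => !((data.map Prod.fst).contains key))
  if missing.length = 1 then
    ((PySem.List.pyGet? missing 0).getD "") ++ " is missing from the request"
  else if missing.length = 2 then
    ((PySem.List.pyGet? missing 0).getD "") ++ " and " ++ ((PySem.List.pyGet? missing 1).getD "") ++ " is missing from the request"
  else
    pvALoop missing missing 0 ""

-- ===== PORT B =====
-- ', '.join(...) is ported as PySem.Str.join (the PySem primitive for str.join)
def missing_keys_message_alt (data : List (String × String)) (keys : List String) : String :=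
  let missing := keys.filter (fun key => !((data.map Prod.fst).contains key))
  if missing.isEmpty then ""
  else if missing.length = 1 then
    missing.headD "" ++ " is missing from the request"
  else
    PySem.Str.join ", " missing.dropLast ++ " and " ++ missing.getLast! ++ " is missing from the request"

-- ===== PRECONDITION & SPEC =====
def Spec_missing_keys_message (data : List (String × String)) (keys : List String) (out : String) : Prop := out = missing_keys_message_alt data keys
instance (data : List (String × String)) (keys : List String) (out : String) : Decidable (Spec_missing_keys_message data keys out) := by unfold Spec_missing_keys_message; infer_instance

-- ===== CLAIM (what is proved, stated in full; the proofs are below) =====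
def Claim_equal_missing_keys_message : Prop := ∀ (data : List (String × String)) (keys : List String), Dom_missing_keys_message data keys → Spec_missing_keys_message data keys (missing_keys_message data keys)

-- ===== LEMMAS AND PROOFS =====

lemma pv_join_singleton (a : String) : PySem.Str.join ", " [a] = a := by
  apply String.toList_injective
  simp [PySem.Str.join, PySem.Chars.join_singleton]

lemma pv_join_cons₂ (a b : String) (t : List String) :
    PySem.Str.join ", " (a :: b :: t) = a ++ ", " ++ PySem.Str.join ", " (b :: t) := by
  apply String.toList_injective
  simp [PySem.Str.join, PySem.Chars.join_cons_cons]

lemma pv_getLast!_cons₂ (a b : String) (t : List String) :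
    (a :: b :: t).getLast! = (b :: t).getLast! := by
  simp [List.getLast!, List.getLast]

lemma pv_pyGet_of_drop (m : List String) (idx : Nat) (a b : String) (r : List String)
    (h : m.drop idx = a :: b :: r) :
    PySem.List.pyGet? m ((idx : Int) + 1) = some b := by
  have hcast : ((idx : Int) + 1) = ((idx + 1 : Nat) : Int) := by push_cast; ring
  rw [hcast, PySem.List.pyGet?_natCast]
  have h2 : (m.drop idx)[1]? = m[idx + 1]? := List.getElem?_drop
  rw [h] at h2
  simpa using h2.symm

lemma pvALoop_eq (m : List String) (r : List String) : ∀ (idx : Nat) (msg : String),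
    m.drop idx = r → 2 ≤ r.length →
    pvALoop m r idx msg =
      msg ++ PySem.Str.join ", " r.dropLast ++ " and " ++ r.getLast! ++ " is missing from the request" := by
  induction r with
  | nil => intro idx msg _ h2; simp at h2
  | cons a rest ih =>
    intro idx msg hdrop hlen
    match rest, ih, hdrop, hlen with
    | [], _, _, hlen => simp at hlen
    | [b], _, hdrop, _ =>
      have hL : m.length - idx = 2 := by
        have := congrArg List.length hdrop; simpa using this
      have hidx : idx + 2 = m.length := by
        by_cases h : idx ≤ m.length
        · omega
        · rw [List.drop_eq_nil_of_le (by omega)] at hdrop; simp at hdrop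
      rw [pvALoop, if_pos hidx, pv_pyGet_of_drop m idx a b [] hdrop]
      apply String.toList_injective
      simp [pv_join_singleton, List.getLast!, List.getLast]
    | b :: c :: t, ih, hdrop, _ =>
      have hL : m.length - idx = t.length + 3 := by
        have := congrArg List.length hdrop; simpa using this
      have hidx : ¬ (idx + 2 = m.length) := by
        by_cases h : idx ≤ m.length
        · omega
        · rw [List.drop_eq_nil_of_le (by omega)] at hdrop; simp at hdrop
      have hdrop' : m.drop (idx + 1) = b :: c :: t := by
        have : m.drop (idx + 1) = (m.drop idx).drop 1 := by
          rw [List.drop_drop]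
        rw [this, hdrop]; simp
      rw [pvALoop, if_neg hidx, ih (idx + 1) (msg ++ a ++ ", ") hdrop' (by simp)]
      have hdl : (a :: b :: c :: t).dropLast = a :: b :: (c :: t).dropLast := by simp
      rw [hdl, pv_join_cons₂, pv_getLast!_cons₂ a, pv_getLast!_cons₂ b]
      apply String.toList_injective
      simp

-- ===== VERDICT (by name: the statement is the Claim_ definition above) =====
theorem missing_keys_message_spec : Claim_equal_missing_keys_message := by
  intro data keys _
  unfold Spec_missing_keys_message missing_keys_message missing_keys_message_alt
  match hx : keys.filter (fun key => !((data.map Prod.fst).contains key)) with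
  | [] => simp [pvALoop]
  | [a] => simp
  | [a, b] =>
    apply String.toList_injective
    simp [PySem.List.pyGet?, PySem.List.pyIdx?, pv_join_singleton, List.getLast!, List.getLast]
  | a :: b :: c :: t =>
    have h3 : ¬ ((a :: b :: c :: t).length = 1) := by simp
    have h4 : ¬ ((a :: b :: c :: t).length = 2) := by simp
    rw [if_neg h3, if_neg h4,
      pvALoop_eq (a :: b :: c :: t) (a :: b :: c :: t) 0 "" (by simp) (by simp)]
    have h5 : (a :: b :: c :: t).isEmpty = false := by simp
    apply String.toList_injective
    simp
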